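-- pv_equiv track=rewrite | github.com/microsoft/MInference | minference/modules/leank.py | get_round_seqlen_and_split_hueristic
-- ===== SOURCE A (Python) =====
-- def get_round_seqlen_and_split_hueristic(seqlen):
--     supported_lengths = [4096, 8192] + [2**i + 8192 for i in range(13, 18)]
--     num_split_hueristic = [2, 2, 4, 4, 8, 8, 16]
--     last_length, last_n_split = supported_lengths[-1], num_split_hueristic[-1]
--     for l, ns in zip(supported_lengths[::-1], num_split_hueristic[::-1]):
--         if seqlen > l:
--             return last_length, last_n_split
--         last_length = l
--         last_n_split = ns
--     return last_length, last_n_split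
-- ===== SOURCE B (Python) =====
-- def get_round_seqlen_and_split_hueristic(seqlen):
--     # supported lengths, ascending: [4096, 8192] + [2**i + 8192 for i in range(13, 18)]
--     supported_lengths = [4096, 8192, 16384, 24576, 40960, 73728, 139264]
--     num_split_hueristic = [2, 2, 4, 4, 8, 8, 16]
--     # hand-rolled bisect_left: first index with supported_lengths[i] >= seqlen
--     lo, hi = 0, len(supported_lengths)
--     while lo < hi:
--         mid = (lo + hi) // 2
--         if supported_lengths[mid] < seqlen:
--             lo = mid + 1
--         else:
--             hi = mid
--     if lo == len(supported_lengths):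
--         lo -= 1
--     return supported_lengths[lo], num_split_hueristic[lo]
-- ===== Notes on version B (the rewrite author's own statement) =====
-- stated objective: idiomatic
-- what changed: Replaced the reversed-list linear scan with trailing-pointer state by a bisect_left-style binary search over the ascending supported_lengths list, clamping an overflow index to the last entry.
import Mathlib
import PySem

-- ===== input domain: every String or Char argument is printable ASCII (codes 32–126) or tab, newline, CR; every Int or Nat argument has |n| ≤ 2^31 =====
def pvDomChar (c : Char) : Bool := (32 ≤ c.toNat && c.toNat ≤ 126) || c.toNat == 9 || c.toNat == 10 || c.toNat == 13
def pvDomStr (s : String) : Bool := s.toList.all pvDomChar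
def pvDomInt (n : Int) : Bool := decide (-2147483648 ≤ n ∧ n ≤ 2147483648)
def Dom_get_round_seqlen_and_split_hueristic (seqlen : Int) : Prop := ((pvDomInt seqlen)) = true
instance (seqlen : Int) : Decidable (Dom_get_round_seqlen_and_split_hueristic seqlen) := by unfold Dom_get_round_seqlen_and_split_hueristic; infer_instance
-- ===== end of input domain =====

-- B replaces A's reversed-list linear scan by a bisect_left-style binary search (idiomatic).
-- ===== PORT A =====
def pvA_loop (seqlen : Int) : List (Int × Int) → Int × Int → Int × Int
  | [], last => last
  | (l, ns) :: rest, last =>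
      if seqlen > l then last else pvA_loop seqlen rest (l, ns)

def get_round_seqlen_and_split_hueristic (seqlen : Int) : Int × Int :=
  let supported_lengths : List Int :=
    [4096, 8192] ++ (PySem.List.pyRange 13 18 1).map (fun i => 2 ^ i.toNat + 8192)
  let num_split_hueristic : List Int := [2, 2, 4, 4, 8, 8, 16]
  let last : Int × Int := (supported_lengths.getLastD 0, num_split_hueristic.getLastD 0)
  pvA_loop seqlen (supported_lengths.reverse.zip num_split_hueristic.reverse) last

-- ===== PORT B =====
-- hand-rolled bisect_left from Source B, index-pair recursion mirroring the while loop
def pvB_bsearch (lengths : List Int) (seqlen : Int) (lo hi : Nat) : Nat :=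
  if h : lo < hi then
    let mid := (lo + hi) / 2
    if lengths.getD mid 0 < seqlen then pvB_bsearch lengths seqlen (mid + 1) hi
    else pvB_bsearch lengths seqlen lo mid
  else lo
termination_by hi - lo
decreasing_by all_goals simp only [mid] at *; omega

def get_round_seqlen_and_split_hueristic_alt (seqlen : Int) : Int × Int :=
  let supported_lengths : List Int := [4096, 8192, 16384, 24576, 40960, 73728, 139264]
  let num_split_hueristic : List Int := [2, 2, 4, 4, 8, 8, 16]
  let lo := pvB_bsearch supported_lengths seqlen 0 supported_lengths.length
  let lo := if lo = supported_lengths.length then lo - 1 else lo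
  (supported_lengths.getD lo 0, num_split_hueristic.getD lo 0)

-- ===== PRECONDITION & SPEC =====
def Spec_get_round_seqlen_and_split_hueristic (seqlen : Int) (out : Int × Int) : Prop := out = get_round_seqlen_and_split_hueristic_alt seqlen
instance (seqlen : Int) (out : Int × Int) : Decidable (Spec_get_round_seqlen_and_split_hueristic seqlen out) := by unfold Spec_get_round_seqlen_and_split_hueristic; infer_instance

-- ===== CLAIM (what is proved, stated in full; the proofs are below) =====
def Claim_equal_get_round_seqlen_and_split_hueristic : Prop := ∀ (seqlen : Int), Dom_get_round_seqlen_and_split_hueristic seqlen → Spec_get_round_seqlen_and_split_hueristic seqlen (get_round_seqlen_and_split_hueristic seqlen)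

-- ===== LEMMAS AND PROOFS =====

-- ===== VERDICT (by name: the statement is the Claim_ definition above) =====
-- guarded unfolding lemmas for the binary search (avoid looping simp on the dite equation)
theorem pvB_bsearch_step (L : List Int) (seqlen : Int) (lo hi : Nat) (h : lo < hi) :
    pvB_bsearch L seqlen lo hi =
      if L.getD ((lo + hi) / 2) 0 < seqlen then pvB_bsearch L seqlen ((lo + hi) / 2 + 1) hi
      else pvB_bsearch L seqlen lo ((lo + hi) / 2) := by
  rw [pvB_bsearch]; simp [h]

theorem pvB_bsearch_stop (L : List Int) (seqlen : Int) (lo hi : Nat) (h : ¬ lo < hi) :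
    pvB_bsearch L seqlen lo hi = lo := by
  rw [pvB_bsearch]; simp [h]

theorem get_round_seqlen_and_split_hueristic_spec : Claim_equal_get_round_seqlen_and_split_hueristic := by
  intro seqlen _
  unfold Spec_get_round_seqlen_and_split_hueristic
  unfold get_round_seqlen_and_split_hueristic get_round_seqlen_and_split_hueristic_alt
  have h1 : (((([4096, 8192] : List Int) ++ (PySem.List.pyRange 13 18 1).map (fun (i : Int) => (2:Int) ^ i.toNat + 8192)).reverse).zip
      (([2, 2, 4, 4, 8, 8, 16] : List Int).reverse)) =
      [(139264, 16), (73728, 8), (40960, 8), (24576, 4), (16384, 4), (8192, 2), (4096, 2)] := by decide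
  simp only [h1, List.getLastD]
  norm_num [pvB_bsearch_step, pvB_bsearch_stop, pvA_loop, List.getD]
  split_ifs <;> first | rfl | omega
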